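-- pv_equiv track=rewrite | github.com/Xaque8787/m3uparser | parser/processors/cleaners.py | enable_cleaners
-- ===== SOURCE A (Python) =====
-- def enable_cleaners(cleaners_list):
--     # Initialize all possible cleaners with False
--     cleaners = {
--         'clean_movies': False,
--         'clean_series': False,
--         'clean_tv': False,
--         'clean_unsorted': False
--     }
--
--     # Update the values based on the cleaners_list
--     for cleaner in cleaners_list:
--         if cleaner == 'movies':
--             cleaners['clean_movies'] = True
--         elif cleaner == 'series':
--             cleaners['clean_series'] = True
--         elif cleaner == 'tv':
--             cleaners['clean_tv'] = True
--         elif cleaner == 'unsorted':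
--             cleaners['clean_unsorted'] = True
--
--     return cleaners
-- ===== SOURCE B (Python) =====
-- MAPPING = (
--     ('movies', 'clean_movies'),
--     ('series', 'clean_series'),
--     ('tv', 'clean_tv'),
--     ('unsorted', 'clean_unsorted'),
-- )
--
--
-- def enable_cleaners(cleaners_list):
--     present = set(cleaners_list)
--     return {flag: tok in present for tok, flag in MAPPING}
-- ===== Notes on version B (the rewrite author's own statement) =====
-- stated objective: idiomatic
-- what changed: Replaces the per-element if/elif dispatch loop that mutates a dict with a single dict comprehension over a constant token->flag mapping, testing membership in a set built once from the input.
import Mathlib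
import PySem

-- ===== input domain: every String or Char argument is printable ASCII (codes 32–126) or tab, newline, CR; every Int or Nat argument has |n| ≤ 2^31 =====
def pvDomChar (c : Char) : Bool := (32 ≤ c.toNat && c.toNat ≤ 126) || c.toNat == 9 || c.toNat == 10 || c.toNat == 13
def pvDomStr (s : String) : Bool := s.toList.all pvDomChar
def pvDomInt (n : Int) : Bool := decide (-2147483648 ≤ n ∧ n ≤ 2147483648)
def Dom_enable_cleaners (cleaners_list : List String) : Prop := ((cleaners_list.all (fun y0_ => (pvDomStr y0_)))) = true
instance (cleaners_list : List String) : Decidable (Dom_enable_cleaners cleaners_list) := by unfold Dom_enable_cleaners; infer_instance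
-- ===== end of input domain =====

-- B changes the decomposition (idiomatic): a dict comprehension over a constant token→flag
-- mapping with membership in set(cleaners_list), instead of A's if/elif dispatch loop mutating a dict.

-- ===== PORT A =====
def enable_cleaners (cleaners_list : List String) : List (String × Bool) :=
  -- cleaners = {...all False...}
  let cleaners : PySem.Dict String Bool :=
    PySem.Dict.ofList [("clean_movies", false), ("clean_series", false),
                       ("clean_tv", false), ("clean_unsorted", false)]
  -- for cleaner in cleaners_list: if/elif chain setting the flag
  let cleaners := cleaners_list.foldl (fun d cleaner =>
    if cleaner == "movies" then d.insert "clean_movies" true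
    else if cleaner == "series" then d.insert "clean_series" true
    else if cleaner == "tv" then d.insert "clean_tv" true
    else if cleaner == "unsorted" then d.insert "clean_unsorted" true
    else d) cleaners
  cleaners.items

-- ===== PORT B =====
-- MAPPING = (('movies','clean_movies'), …)
def pvMapping : List (String × String) :=
  [("movies", "clean_movies"), ("series", "clean_series"),
   ("tv", "clean_tv"), ("unsorted", "clean_unsorted")]

def enable_cleaners_alt (cleaners_list : List String) : List (String × Bool) :=
  let present : PySem.Set String := PySem.Set.ofList cleaners_list
  pvMapping.map (fun p => (p.2, PySem.Set.contains present p.1))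

-- ===== PRECONDITION & SPEC =====
def Spec_enable_cleaners (cleaners_list : List String) (out : List (String × Bool)) : Prop := out = enable_cleaners_alt cleaners_list
instance (cleaners_list : List String) (out : List (String × Bool)) : Decidable (Spec_enable_cleaners cleaners_list out) := by unfold Spec_enable_cleaners; infer_instance

-- ===== CLAIM (what is proved, stated in full; the proofs are below) =====
def Claim_equal_enable_cleaners : Prop := ∀ (cleaners_list : List String), Dom_enable_cleaners cleaners_list → Spec_enable_cleaners cleaners_list (enable_cleaners cleaners_list)

-- ===== LEMMAS AND PROOFS =====

-- A's dict always keeps the shape [(clean_movies, m), (clean_series, s), (clean_tv, t), (clean_unsorted, u)];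
-- the fold ORs into each slot whether its token occurs in the rest of the list.
lemma enable_cleaners_fold_inv (cl : List String) (m s t u : Bool) :
    (cl.foldl (fun d cleaner =>
        if cleaner == "movies" then d.insert "clean_movies" true
        else if cleaner == "series" then d.insert "clean_series" true
        else if cleaner == "tv" then d.insert "clean_tv" true
        else if cleaner == "unsorted" then d.insert "clean_unsorted" true
        else d)
      (PySem.Dict.ofList [("clean_movies", m), ("clean_series", s),
                          ("clean_tv", t), ("clean_unsorted", u)])).items
    = [("clean_movies", m || cl.contains "movies"),
       ("clean_series", s || cl.contains "series"),
       ("clean_tv", t || cl.contains "tv"),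
       ("clean_unsorted", u || cl.contains "unsorted")] := by
  induction cl generalizing m s t u with
  | nil => simp [PySem.Dict.ofList, PySem.Dict.update, PySem.Dict.empty, PySem.Dict.insert, PySem.Dict.contains]
  | cons x xs ih =>
    by_cases hm : x = "movies"
    · subst hm
      simpa [PySem.Dict.insert, PySem.Dict.ofList] using ih true s t u
    · by_cases hs : x = "series"
      · subst hs
        simpa [PySem.Dict.insert, PySem.Dict.ofList] using ih m true t u
      · by_cases ht : x = "tv"
        · subst ht
          simpa [PySem.Dict.insert, PySem.Dict.ofList] using ih m s true u
        · by_cases hu : x = "unsorted"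
          · subst hu
            simpa [PySem.Dict.insert, PySem.Dict.ofList] using ih m s t true
          · have hm' : "movies" ≠ x := Ne.symm hm
            have hs' : "series" ≠ x := Ne.symm hs
            have ht' : "tv" ≠ x := Ne.symm ht
            have hu' : "unsorted" ≠ x := Ne.symm hu
            simpa [hm, hs, ht, hu, hm', hs', ht', hu'] using ih m s t u

-- set(cl) and cl agree on membership tests
lemma contains_ofList (cl : List String) (x : String) :
    PySem.Set.contains (PySem.Set.ofList cl) x = cl.contains x := by
  simp [PySem.Set.contains, List.contains_eq_mem, PySem.Set.mem_ofList]

-- ===== VERDICT (by name: the statement is the Claim_ definition above) =====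
theorem enable_cleaners_spec : Claim_equal_enable_cleaners := by
  intro cl _
  unfold Spec_enable_cleaners enable_cleaners enable_cleaners_alt pvMapping
  simp only [enable_cleaners_fold_inv, contains_ofList, List.map]
  rfl
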